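-- pv_equiv track=rewrite | github.com/aizpurua23a/aoc20 | 05/main.py | get_int_from_seat_str
-- ===== SOURCE A (Python) =====
-- def get_int_from_seat_str(seat_str):
--     sum = 0
--     for index, char in enumerate(seat_str):
--         power = len(seat_str) - index - 1
--         charnum = 0
--         if char == "R" or char == "B":
--             charnum = 1
--         sum += charnum * pow(2, power)
--     return sum
-- ===== SOURCE B (Python) =====
-- def get_int_from_seat_str(seat_str):
--     result = 0
--     for char in seat_str:
--         result = result * 2 + (1 if char == "R" or char == "B" else 0)
--     return result
-- ===== Notes on version B (the rewrite author's own statement) =====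
-- stated objective: faster
-- what changed: Replaces the positional-power sum (pow(2, len-index-1) per character via enumerate) with Horner's scheme: a single running accumulator doubled each step, no index and no pow.
import Mathlib
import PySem

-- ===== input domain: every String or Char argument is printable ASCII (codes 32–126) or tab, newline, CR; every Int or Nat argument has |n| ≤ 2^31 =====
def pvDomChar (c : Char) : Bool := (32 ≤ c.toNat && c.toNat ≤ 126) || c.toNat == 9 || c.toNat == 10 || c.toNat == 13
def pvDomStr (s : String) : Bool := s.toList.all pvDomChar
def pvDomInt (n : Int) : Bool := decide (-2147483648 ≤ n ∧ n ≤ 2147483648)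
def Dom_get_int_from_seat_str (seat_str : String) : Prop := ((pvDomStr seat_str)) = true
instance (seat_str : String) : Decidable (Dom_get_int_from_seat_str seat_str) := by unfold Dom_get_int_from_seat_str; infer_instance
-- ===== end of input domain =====

-- B replaces A's per-character pow(2, len-index-1) sum with a single Horner accumulator
-- (result = result*2 + bit): one O(n) pass instead of a fresh pow per character (timed faster).


-- ===== PORT A =====
-- pow(2, power) with power = len - index - 1, always ≥ 0 inside the loop; ported as 2 ^ power.toNat.
def get_int_from_seat_str (seat_str : String) : Int :=
  (PySem.List.enumerate seat_str.toList).foldl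
    (fun sum p =>
      let power : Int := (seat_str.toList.length : Int) - p.1 - 1
      let charnum : Int := if p.2 = 'R' ∨ p.2 = 'B' then 1 else 0
      sum + charnum * 2 ^ power.toNat) 0

-- ===== PORT B =====
def get_int_from_seat_str_alt (seat_str : String) : Int :=
  seat_str.toList.foldl
    (fun result c => result * 2 + (if c = 'R' ∨ c = 'B' then 1 else 0)) 0

-- ===== PRECONDITION & SPEC =====
def Spec_get_int_from_seat_str (seat_str : String) (out : Int) : Prop := out = get_int_from_seat_str_alt seat_str
instance (seat_str : String) (out : Int) : Decidable (Spec_get_int_from_seat_str seat_str out) := by unfold Spec_get_int_from_seat_str; infer_instance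

-- ===== CLAIM (what is proved, stated in full; the proofs are below) =====
def Claim_equal_get_int_from_seat_str : Prop := ∀ (seat_str : String), Dom_get_int_from_seat_str seat_str → Spec_get_int_from_seat_str seat_str (get_int_from_seat_str seat_str)

-- ===== LEMMAS AND PROOFS =====

def pvBit (c : Char) : Int := if c = 'R' ∨ c = 'B' then 1 else 0

-- the common value: big-endian binary value of the bit string
def pvVal : List Char → Int
  | [] => 0
  | c :: t => pvBit c * 2 ^ t.length + pvVal t

theorem pvA_fold (n : Int) :
    ∀ (l : List Char) (s a : Int), s + l.length = n →
      (PySem.List.enumerate l s).foldl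
        (fun sum p => sum + (if p.2 = 'R' ∨ p.2 = 'B' then (1 : Int) else 0) * 2 ^ (n - p.1 - 1).toNat) a
      = a + pvVal l := by
  intro l
  induction l with
  | nil => intro s a h; simp [PySem.List.enumerate_nil, pvVal]
  | cons c t ih =>
    intro s a h
    simp only [List.length_cons] at h
    rw [PySem.List.enumerate_cons, List.foldl_cons, ih (s + 1) _ (by push_cast at h ⊢; omega)]
    have hp : (n - s - 1).toNat = t.length := by omega
    simp only [pvVal, hp, pvBit]
    ring

theorem pvB_fold :
    ∀ (l : List Char) (a : Int),
      l.foldl (fun result c => result * 2 + (if c = 'R' ∨ c = 'B' then (1 : Int) else 0)) a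
      = a * 2 ^ l.length + pvVal l := by
  intro l
  induction l with
  | nil => intro a; simp [pvVal]
  | cons c t ih =>
    intro a
    rw [List.foldl_cons, ih]
    simp only [pvVal, List.length_cons, pvBit]
    ring

-- ===== VERDICT (by name: the statement is the Claim_ definition above) =====
theorem get_int_from_seat_str_spec : Claim_equal_get_int_from_seat_str := by
  intro s _
  unfold Spec_get_int_from_seat_str get_int_from_seat_str get_int_from_seat_str_alt
  rw [pvB_fold s.toList 0, pvA_fold (s.toList.length : Int) s.toList 0 0 (by simp)]
  simp
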